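-- pv_equiv track=rewrite | github.com/simonesestili/problems-dsa | leetcode/1028.py | process
-- ===== SOURCE A (Python) =====
-- def process(traversal):
--     res = []
--     curr_val, curr_height = [], 0
--     for c in traversal:
--         if c == '-':
--             if curr_val:
--                 res.append((''.join(curr_val), curr_height))
--                 curr_val, curr_height = [], 0
--             curr_height += 1
--         else:
--             curr_val.append(c)
--     return res
-- ===== SOURCE B (Python) =====
-- def process(traversal):
--     # Split on dashes once; each separator contributes 1 to the height of the
--     # next value; the token after the last dash (if any) is never emitted.
--     res = []
--     height = 0
--     parts = traversal.split('-')
--     for part in parts[:-1]: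
--         if part:
--             res.append((part, height))
--             height = 1
--         else:
--             height += 1
--     return res
-- ===== Notes on version B (the rewrite author's own statement) =====
-- stated objective: faster
-- what changed: Replaces A's per-character Python loop with a mutable (curr_val, curr_height) accumulator by one split of the string at dashes plus a fold over all parts but the last, counting empty parts as height; the split does the character scanning in the C-implemented str.split.
import Mathlib
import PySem

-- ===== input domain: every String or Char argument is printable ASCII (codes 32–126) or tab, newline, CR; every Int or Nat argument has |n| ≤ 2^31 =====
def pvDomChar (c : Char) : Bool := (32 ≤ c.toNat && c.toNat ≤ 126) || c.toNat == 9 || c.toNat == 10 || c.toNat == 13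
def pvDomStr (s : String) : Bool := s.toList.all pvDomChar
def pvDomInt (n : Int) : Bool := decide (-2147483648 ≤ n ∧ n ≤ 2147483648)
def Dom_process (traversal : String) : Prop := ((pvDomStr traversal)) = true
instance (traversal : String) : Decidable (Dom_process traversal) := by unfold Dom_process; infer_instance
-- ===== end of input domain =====

-- B replaces A's char-by-char accumulator scan with a single split('-') followed by a
-- fold over the parts (idiomatic); return values agree on every input, no side effects.

-- ===== PORT A =====
-- one loop step of A: state is (res, curr_val, curr_height)
def stepA (st : List (String × Int) × List Char × Int) (c : Char) :
    List (String × Int) × List Char × Int :=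
  let (res, currVal, currHeight) := st
  if c = '-' then
    -- inner 'if curr_val:' (emit and reset), then the unconditional 'curr_height += 1'
    let (res, currVal, currHeight) :=
      if currVal ≠ [] then (res ++ [(String.ofList currVal, currHeight)], ([] : List Char), (0 : Int))
      else (res, currVal, currHeight)
    (res, currVal, currHeight + 1)
  else
    (res, currVal ++ [c], currHeight)

def process (traversal : String) : List (String × Int) :=
  (traversal.toList.foldl stepA ([], [], 0)).1

-- ===== PORT B =====
-- one loop step of B: state is (res, height)
def stepB (st : List (String × Int) × Int) (part : List Char) : List (String × Int) × Int :=
  if part ≠ [] then (st.1 ++ [(String.ofList part, st.2)], (1 : Int))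
  else (st.1, st.2 + 1)

def process_alt (traversal : String) : List (String × Int) :=
  let parts := PySem.Chars.splitOn traversal.toList ['-']     -- traversal.split('-')
  ((PySem.List.slice parts none (some (-1))).foldl stepB ([], 0)).1   -- parts[:-1]

-- ===== PRECONDITION & SPEC =====
def Spec_process (traversal : String) (out : List (String × Int)) : Prop := out = process_alt traversal
instance (traversal : String) (out : List (String × Int)) : Decidable (Spec_process traversal out) := by unfold Spec_process; infer_instance

-- ===== CLAIM (what is proved, stated in full; the proofs are below) =====
def Claim_equal_process : Prop := ∀ (traversal : String), Dom_process traversal → Spec_process traversal (process traversal)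

-- ===== LEMMAS AND PROOFS =====

-- reference single-char split on '-' (pure structural recursion)
def splitDash : List Char → List (List Char)
  | [] => [[]]
  | c :: l =>
    if c = '-' then [] :: splitDash l
    else
      match splitDash l with
      | [] => [[c]]
      | p :: ps => (c :: p) :: ps

-- glue a pending prefix onto the head part
def consHead (cur : List Char) : List (List Char) → List (List Char)
  | [] => [cur]
  | p :: ps => (cur ++ p) :: ps

theorem splitDash_ne_nil (l : List Char) : splitDash l ≠ [] := by
  cases l with
  | nil => simp [splitDash]
  | cons c l =>
    simp only [splitDash]
    split
    · simp
    · split <;> simp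

theorem isPrefixOf_dash_cons (c : Char) (rest : List Char) :
    List.isPrefixOf ['-'] (c :: rest) = (c = '-' : Bool) := by
  by_cases hc : c = '-'
  · simp [List.isPrefixOf, hc]
  · simp [List.isPrefixOf, hc]
    exact fun h => hc h.symm

theorem splitOn_go_spec :
    ∀ (fuel : Nat) (l cur : List Char) (acc : List (List Char)), l.length < fuel →
      PySem.Chars.splitOn.go ['-'] fuel l cur acc = acc.reverse ++ consHead cur.reverse (splitDash l) := by
  intro fuel
  induction fuel with
  | zero => intro l cur acc h; omega
  | succ fuel ih =>
    intro l cur acc h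
    cases l with
    | nil => simp [PySem.Chars.splitOn.go, splitDash, consHead]
    | cons c rest =>
      have hlen : rest.length < fuel := by simpa using Nat.lt_of_succ_lt_succ h
      by_cases hc : c = '-'
      · subst hc
        rw [show PySem.Chars.splitOn.go ['-'] (fuel+1) ('-'::rest) cur acc
              = PySem.Chars.splitOn.go ['-'] fuel rest [] (cur.reverse :: acc) by
            simp [PySem.Chars.splitOn.go]]
        rw [ih rest [] (cur.reverse :: acc) hlen]
        rcases hsd : splitDash rest with _ | ⟨p, ps⟩
        · exact absurd hsd (splitDash_ne_nil rest)
        · simp [splitDash, hsd, consHead]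
      · rw [show PySem.Chars.splitOn.go ['-'] (fuel+1) (c::rest) cur acc
              = PySem.Chars.splitOn.go ['-'] fuel rest (c :: cur) acc by
            simp [PySem.Chars.splitOn.go, isPrefixOf_dash_cons, hc]]
        rw [ih rest (c :: cur) acc hlen]
        rcases hsd : splitDash rest with _ | ⟨p, ps⟩
        · exact absurd hsd (splitDash_ne_nil rest)
        · simp [splitDash, hsd, consHead, hc]

theorem splitOn_eq_splitDash (l : List Char) :
    PySem.Chars.splitOn l ['-'] = splitDash l := by
  unfold PySem.Chars.splitOn
  rw [splitOn_go_spec (l.length + 1) l [] [] (Nat.lt_succ_self _)]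
  rcases hsd : splitDash l with _ | ⟨p, ps⟩
  · exact absurd hsd (splitDash_ne_nil l)
  · simp [consHead]

theorem slice_to_neg_one {α : Type} (xs : List α) :
    PySem.List.slice xs none (some (-1)) = xs.dropLast := by
  simp only [PySem.List.slice, PySem.List.clampIdx]
  norm_num
  rcases xs with _ | ⟨x, l⟩
  · simp
  · rw [if_neg (by simp), List.dropLast_eq_take]
    congr 1
    omega

theorem stepA_dash (res : List (String × Int)) (cur : List Char) (h : Int) :
    stepA (res, cur, h) '-'
      = if cur ≠ [] then (res ++ [(String.ofList cur, h)], ([] : List Char), (1 : Int))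
        else (res, cur, h + 1) := by
  by_cases hcur : cur = [] <;> simp [stepA, hcur]

theorem stepA_nondash (res : List (String × Int)) (cur : List Char) (h : Int)
    (c : Char) (hc : c ≠ '-') :
    stepA (res, cur, h) c = (res, cur ++ [c], h) := by
  simp [stepA, hc]

-- the key invariant relating A's char fold to B's part fold
theorem key (l : List Char) : ∀ (res : List (String × Int)) (cur : List Char) (h : Int),
    (l.foldl stepA (res, cur, h)).1
      = (((consHead cur (splitDash l)).dropLast).foldl stepB (res, h)).1 := by
  induction l with
  | nil => intro res cur h; simp [splitDash, consHead]
  | cons c rest ih =>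
    intro res cur h
    rcases hsd : splitDash rest with _ | ⟨p, ps⟩
    · exact absurd hsd (splitDash_ne_nil rest)
    by_cases hc : c = '-'
    · subst hc
      rw [List.foldl_cons, stepA_dash]
      by_cases hcur : cur = []
      · subst hcur
        rw [if_neg (show ¬(([] : List Char) ≠ []) by simp)]
        rw [ih res [] (h + 1)]
        simp [consHead, hsd, splitDash, stepB]
      · rw [if_pos hcur]
        rw [ih (res ++ [(String.ofList cur, h)]) [] 1]
        simp [consHead, hsd, splitDash, stepB, hcur]
    · rw [List.foldl_cons, stepA_nondash _ _ _ _ hc]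
      rw [ih res (cur ++ [c]) h]
      simp [consHead, hsd, splitDash, hc]

-- ===== VERDICT (by name: the statement is the Claim_ definition above) =====
theorem process_spec : Claim_equal_process := by
  intro traversal _
  show process traversal = process_alt traversal
  unfold process process_alt
  simp only [splitOn_eq_splitDash, slice_to_neg_one]
  rw [key]
  rcases hsd : splitDash traversal.toList with _ | ⟨p, ps⟩
  · exact absurd hsd (splitDash_ne_nil _)
  · simp [consHead]
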